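-- pv_equiv track=rewrite | github.com/Packerson/Packerson | chessboard.py | chessboard
-- ===== SOURCE A (Python) =====
-- def chessboard(n):
--     empty = ''
--
--     for i in range(n):
--         if i % 2:
--             empty += " #" * (int(n / 2))
--             if i % 2:
--                 empty += " "
--             empty += "\n"
--         else:
--             empty += "# " * (int(n / 2))
--             if n % 2:
--                 empty += "#"
--             empty += '\n'
--
--     return empty
-- ===== SOURCE B (Python) =====
-- def chessboard(n):
--     if n <= 0:
--         return ''
--     half = n // 2
--     even = "# " * half + ("#" if n % 2 else "") + "\n"
--     odd = " #" * half + " \n"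
--     return (even + odd) * half + (even if n % 2 else "")
-- ===== Notes on version B (the rewrite author's own statement) =====
-- stated objective: simpler
-- what changed: Replaces the per-row loop over range(n) with closed-form string arithmetic: the two fixed row strings are built once and the board is (even+odd)*(n//2) plus a trailing even row for odd n.
import Mathlib
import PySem

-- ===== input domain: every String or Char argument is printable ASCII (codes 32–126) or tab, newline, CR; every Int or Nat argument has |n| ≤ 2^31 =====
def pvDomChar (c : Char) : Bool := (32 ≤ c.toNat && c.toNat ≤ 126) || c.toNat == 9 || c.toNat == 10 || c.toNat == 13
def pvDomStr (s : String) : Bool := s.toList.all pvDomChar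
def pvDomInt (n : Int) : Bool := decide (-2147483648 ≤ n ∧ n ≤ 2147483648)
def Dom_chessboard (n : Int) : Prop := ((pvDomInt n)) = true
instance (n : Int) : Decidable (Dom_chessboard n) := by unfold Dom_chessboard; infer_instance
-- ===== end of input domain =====

-- B replaces A's per-row loop over range(n) by building the two fixed row strings once
-- and repeating the (even row ++ odd row) block n//2 times in closed form (objective: simpler, loop-free).

-- shared helper: Python's 's * k' string repetition
def strMul (s : String) : Nat → String
  | 0 => ""
  | k + 1 => strMul s k ++ s

-- ===== PORT A =====
def chessboard (n : Int) : String :=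
  (PySem.List.pyRange 0 n 1).foldl (fun empty i =>
    if i % 2 ≠ 0 then
      let e1 := empty ++ strMul " #" ((n / 2).toNat)
      let e2 := if i % 2 ≠ 0 then e1 ++ " " else e1
      e2 ++ "\n"
    else
      let e1 := empty ++ strMul "# " ((n / 2).toNat)
      let e2 := if n % 2 ≠ 0 then e1 ++ "#" else e1
      e2 ++ "\n") ""

-- ===== PORT B =====
def chessboard_alt (n : Int) : String :=
  if n ≤ 0 then ""
  else
    let half := (n / 2).toNat
    let even := strMul "# " half ++ (if n % 2 ≠ 0 then "#" else "") ++ "\n"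
    let odd := strMul " #" half ++ " \n"
    strMul (even ++ odd) half ++ (if n % 2 ≠ 0 then even else "")

-- ===== PRECONDITION & SPEC =====
def Spec_chessboard (n : Int) (out : String) : Prop := out = chessboard_alt n
instance (n : Int) (out : String) : Decidable (Spec_chessboard n out) := by unfold Spec_chessboard; infer_instance

-- ===== CLAIM (what is proved, stated in full; the proofs are below) =====
def Claim_equal_chessboard : Prop := ∀ (n : Int), Dom_chessboard n → Spec_chessboard n (chessboard n)

-- ===== LEMMAS AND PROOFS =====

/-- Concatenation of a list of strings, left to right. -/
def catList : List String → String
  | [] => ""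
  | a :: t => a ++ catList t

theorem catList_append (a b : List String) : catList (a ++ b) = catList a ++ catList b := by
  induction a with
  | nil => simp [catList]
  | cons x t ih => simp [catList, ih, String.append_assoc]

/-- A left fold that appends `g x` for each element is the initial string followed by the
concatenation of the pieces. -/
theorem foldl_cat {α : Type} (f : String → α → String) (g : α → String)
    (hf : ∀ s x, f s x = s ++ g x) :
    ∀ (l : List α) (s : String), l.foldl f s = s ++ catList (l.map g) := by
  intro l
  induction l with
  | nil => intro s; simp [catList]
  | cons x t ih =>
    intro s
    simp only [List.foldl_cons, List.map_cons, catList]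
    rw [ih, hf, String.append_assoc]

theorem strMul_succ (s : String) (k : Nat) : strMul s (k + 1) = strMul s k ++ s := rfl

/-- Concatenating an alternating row function over `range` gives block repetition. -/
theorem cat_range_even (E O : String) (g : Nat → String)
    (hE : ∀ h : Nat, g (2 * h) = E) (hO : ∀ h : Nat, g (2 * h + 1) = O) :
    ∀ h : Nat, catList ((List.range (2 * h)).map g) = strMul (E ++ O) h := by
  intro h
  induction h with
  | zero => simp [catList, strMul]
  | succ m ih =>
    have h2 : 2 * (m + 1) = (2 * m + 1) + 1 := by omega
    rw [h2, List.range_succ, List.range_succ, List.map_append, List.map_append,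
        catList_append, catList_append, ih]
    simp [catList, hE, hO, strMul_succ, String.append_assoc]

theorem cat_range_odd (E O : String) (g : Nat → String)
    (hE : ∀ h : Nat, g (2 * h) = E) (hO : ∀ h : Nat, g (2 * h + 1) = O) (h : Nat) :
    catList ((List.range (2 * h + 1)).map g) = strMul (E ++ O) h ++ E := by
  rw [List.range_succ, List.map_append, catList_append, cat_range_even E O g hE hO]
  simp [catList, hE]

/-- The per-row string A appends at index `i`, collapsed by associativity. -/
def rowA (n i : Int) : String :=
  if i % 2 ≠ 0 then strMul " #" ((n / 2).toNat) ++ (" " ++ "\n")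
  else if n % 2 ≠ 0 then strMul "# " ((n / 2).toNat) ++ ("#" ++ "\n")
  else strMul "# " ((n / 2).toNat) ++ "\n"

theorem chessboard_eq_cat (n : Int) :
    chessboard n = catList ((PySem.List.pyRange 0 n 1).map (rowA n)) := by
  unfold chessboard
  rw [foldl_cat _ (rowA n)]
  · simp
  · intro s x
    simp only [rowA]
    split_ifs <;> simp [String.append_assoc]

-- ===== VERDICT (by name: the statement is the Claim_ definition above) =====
theorem chessboard_spec : Claim_equal_chessboard := by
  intro n _
  unfold Spec_chessboard chessboard_alt
  by_cases hn : n ≤ 0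
  · rw [chessboard_eq_cat, PySem.List.pyRange_one_eq_nil hn, if_pos hn]
    rfl
  · rw [if_neg hn]
    rw [chessboard_eq_cat, PySem.List.pyRange_one, List.map_map]
    simp only [sub_zero, zero_add]
    by_cases hpar : n % 2 = 0
    · -- n even and positive
      have hE : ∀ h : Nat, rowA n ((2 * h : Nat) : Int)
          = strMul "# " ((n / 2).toNat) ++ "\n" := by
        intro h
        simp [rowA, hpar]
      have hO : ∀ h : Nat, rowA n ((2 * h + 1 : Nat) : Int)
          = strMul " #" ((n / 2).toNat) ++ (" " ++ "\n") := by
        intro h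
        simp [rowA]
      have hk : n.toNat = 2 * (n.toNat / 2) := by omega
      have hhalf : (n / 2).toNat = n.toNat / 2 := by omega
      rw [hk, cat_range_even _ _ _ hE hO]
      simp [hpar, hhalf, String.append_assoc]
    · -- n odd and positive
      have hE : ∀ h : Nat, rowA n ((2 * h : Nat) : Int)
          = strMul "# " ((n / 2).toNat) ++ ("#" ++ "\n") := by
        intro h
        simp [rowA, hpar]
      have hO : ∀ h : Nat, rowA n ((2 * h + 1 : Nat) : Int)
          = strMul " #" ((n / 2).toNat) ++ (" " ++ "\n") := by
        intro h
        simp [rowA]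
      have hk : n.toNat = 2 * (n.toNat / 2) + 1 := by omega
      have hhalf : (n / 2).toNat = n.toNat / 2 := by omega
      rw [hk, cat_range_odd _ _ _ hE hO]
      simp [hpar, hhalf, String.append_assoc]
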